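-- pv_equiv track=rewrite | github.com/ghalifaten/master_thesis | .ipynb_checkpoints/create_triplets-checkpoint.py | extract_pairs
-- ===== SOURCE A (Python) =====
-- from itertools import combinations
--
-- def extract_pairs(elements, labels, t):
--     positive_pairs = []
--     negative_pairs = []
--     for e1, e2 in combinations(elements, 2):
--         common_labels = set(labels[e1]).intersection(labels[e2])
--         if len(common_labels) > t:
--             positive_pairs.append((e1, e2))
--         if not common_labels:
--             negative_pairs.append((e1, e2))
--     return positive_pairs, negative_pairs
-- ===== SOURCE B (Python) =====
-- from itertools import combinations
--
--
-- def extract_pairs(elements, labels, t):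
--     # inverted index: label -> increasing list of positions carrying it
--     index = {}
--     for i, e in enumerate(elements):
--         for lab in set(labels[e]):
--             index.setdefault(lab, []).append(i)
--     # shared-label count per (ordered) position pair
--     count = {}
--     for idxs in index.values():
--         for i, j in combinations(idxs, 2):
--             count[(i, j)] = count.get((i, j), 0) + 1
--     positive_pairs = []
--     negative_pairs = []
--     for (i, e1), (j, e2) in combinations(list(enumerate(elements)), 2):
--         c = count.get((i, j), 0)
--         if c > t:
--             positive_pairs.append((e1, e2))
--         if c == 0:
--             negative_pairs.append((e1, e2))
--     return positive_pairs, negative_pairs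
-- ===== Notes on version B (the rewrite author's own statement) =====
-- stated objective: faster
-- what changed: Replaces A's per-pair set-intersection (a full set build and scan for each of the O(n^2) pairs) by an inverted index label->positions and a counter of shared labels per position pair, so the final pass over combinations is a plain table lookup.
-- outside the precondition, e.g. on extract_pairs([5], {}, 0): A returns ([], []), B raises KeyError
import Mathlib
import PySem

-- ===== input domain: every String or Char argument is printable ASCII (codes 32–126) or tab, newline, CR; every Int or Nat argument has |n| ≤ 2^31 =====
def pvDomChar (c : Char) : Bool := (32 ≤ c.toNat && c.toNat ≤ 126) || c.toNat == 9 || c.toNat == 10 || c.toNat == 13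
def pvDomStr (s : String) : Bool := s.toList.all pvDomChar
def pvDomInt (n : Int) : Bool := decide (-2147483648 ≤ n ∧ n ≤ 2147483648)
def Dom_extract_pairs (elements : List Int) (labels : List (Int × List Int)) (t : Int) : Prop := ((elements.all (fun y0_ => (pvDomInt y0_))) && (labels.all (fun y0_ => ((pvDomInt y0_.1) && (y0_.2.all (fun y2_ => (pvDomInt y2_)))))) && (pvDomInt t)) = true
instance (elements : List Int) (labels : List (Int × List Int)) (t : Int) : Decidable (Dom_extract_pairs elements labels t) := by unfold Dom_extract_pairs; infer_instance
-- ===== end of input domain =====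

-- B replaces A's per-pair set intersections by an inverted index (label -> positions) and a
-- shared-label counter over position pairs, looked up in one final pass over the pairs (objective: faster).

-- ===== PORT A =====
def extract_pairs (elements : List Int) (labels : List (Int × List Int)) (t : Int) : (List (Int × Int)) × (List (Int × Int)) :=
  let d : PySem.Dict Int (List Int) := PySem.Dict.mk labels
  ((PySem.List.combinations elements 2).map (fun c => (c.getD 0 0, c.getD 1 0))).foldl
    (fun acc p =>
      let common := PySem.Set.inter (PySem.Set.ofList (d.getD p.1 [])) (d.getD p.2 [])
      ((if (common.length : Int) > t then acc.1 ++ [p] else acc.1),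
       (if common.isEmpty then acc.2 ++ [p] else acc.2)))
    ([], [])

-- ===== PORT B =====
def extract_pairs_alt (elements : List Int) (labels : List (Int × List Int)) (t : Int) : (List (Int × Int)) × (List (Int × Int)) :=
  let d : PySem.Dict Int (List Int) := PySem.Dict.mk labels
  let evs : List (Int × Int) :=
    (PySem.List.enumerate elements 0).flatMap
      (fun p => (PySem.Set.ofList (d.getD p.2 [])).map (fun lab => (lab, p.1)))
  let index : PySem.Dict Int (List Int) :=
    evs.foldl (fun d q => d.modify q.1 [] (fun s => s ++ [q.2])) (PySem.Dict.mk [])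
  let cevs : List (Int × Int) :=
    index.values.flatMap (fun idxs => (PySem.List.combinations idxs 2).map (fun c => (c.getD 0 0, c.getD 1 0)))
  let count : PySem.Dict (Int × Int) Int :=
    cevs.foldl (fun d k => d.modify k 0 (fun x => x + 1)) (PySem.Dict.mk [])
  ((PySem.List.combinations (PySem.List.enumerate elements 0) 2).map
      (fun c => (c.getD 0 (0, 0), c.getD 1 (0, 0)))).foldl
    (fun acc pq =>
      let c := count.getD (pq.1.1, pq.2.1) 0
      ((if c > t then acc.1 ++ [(pq.1.2, pq.2.2)] else acc.1),
       (if c == 0 then acc.2 ++ [(pq.1.2, pq.2.2)] else acc.2)))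
    ([], [])

-- ===== PRECONDITION & SPEC =====
-- Pre_ requires every element to occur as a key of labels. A dereferences labels only inside the
-- pair loop, so on lists of fewer than two elements it returns ([], []) even when a key is missing,
-- while B's inverted-index build looks every element up and raises there; those inputs are excluded.
def Pre_extract_pairs (elements : List Int) (labels : List (Int × List Int)) (t : Int) : Prop :=
  ∀ e ∈ elements, e ∈ labels.map Prod.fst
instance (elements : List Int) (labels : List (Int × List Int)) (t : Int) : Decidable (Pre_extract_pairs elements labels t) := by unfold Pre_extract_pairs; infer_instance

def pvWitness_extract_pairs : List Int × (List (Int × List Int)) × Int :=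
  ([0, 1, 2], [(0, [5, 6]), (1, [6]), (2, [])], 0)

def Spec_extract_pairs (elements : List Int) (labels : List (Int × List Int)) (t : Int) (out : (List (Int × Int)) × (List (Int × Int))) : Prop := out = extract_pairs_alt elements labels t
instance (elements : List Int) (labels : List (Int × List Int)) (t : Int) (out : (List (Int × Int)) × (List (Int × Int))) : Decidable (Spec_extract_pairs elements labels t out) := by unfold Spec_extract_pairs; infer_instance

-- ===== CLAIM (what is proved, stated in full; the proofs are below) =====
def Claim_equal_extract_pairs : Prop := ∀ (elements : List Int) (labels : List (Int × List Int)) (t : Int), Dom_extract_pairs elements labels t → Pre_extract_pairs elements labels t → Spec_extract_pairs elements labels t (extract_pairs elements labels t)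

-- ===== LEMMAS AND PROOFS =====

-- Proof-side abbreviations and lemmas (not used by the ports or the claim).
def pvF : List Int -> Int × Int := fun c => (c.getD 0 0, c.getD 1 0)

theorem pairsF_cons (x : Int) (xs : List Int) :
    (PySem.List.combinations (x :: xs) 2).map pvF
      = xs.map (fun y => (x, y)) ++ (PySem.List.combinations xs 2).map pvF := by
  show (PySem.List.combinations (x :: xs) (1+1)).map pvF = _
  rw [PySem.List.combinations_cons_succ, PySem.List.combinations_one]
  simp [List.map_map, pvF, Function.comp]

theorem flatMap_ite_singleton {α β : Type} (q : α → Bool) (f : α → β) (l : List α) :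
    l.flatMap (fun x => if q x then [f x] else []) = (l.filter q).map f := by
  induction l with
  | nil => rfl
  | cons a l ih => by_cases h : q a <;> simp [List.filter_cons, h, ih]

theorem sum_map_ite_one_zero_nat {α : Type} (p : α → Bool) (l : List α) :
    (l.map (fun x => if p x then 1 else 0)).sum = l.countP p := by
  induction l with
  | nil => rfl
  | cons a l ih => by_cases h : p a <;> simp [h, ih] <;> omega

def pvG : List (Int × Int) -> (Int × Int) × (Int × Int) := fun c => (c.getD 0 (0, 0), c.getD 1 (0, 0))
def pvProj : (Int × Int) × (Int × Int) -> Int × Int := fun pq => (pq.1.2, pq.2.2)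

theorem pairsA_eq (elements : List Int) :
    (PySem.List.combinations elements 2).map pvF
      = ((PySem.List.combinations (PySem.List.enumerate elements 0) 2).map pvG).map pvProj := by
  conv_lhs => rw [← PySem.List.map_snd_enumerate elements 0]
  rw [PySem.List.combinations_map, List.map_map, List.map_map]
  refine List.map_congr_left ?_
  intro c hc
  have hlen : c.length = 2 := ((PySem.List.mem_combinations_iff _ _ _).1 hc).2
  match c, hlen with
  | [p, q], _ => rfl

def labOf (labels : List (Int × List Int)) (e : Int) : List Int :=
  (PySem.Dict.mk labels).getD e []

def evsOf (elements : List Int) (labels : List (Int × List Int)) : List (Int × Int) :=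
  (PySem.List.enumerate elements 0).flatMap
    (fun p => (PySem.Set.ofList (labOf labels p.2)).map (fun lab => (lab, p.1)))

def grpOf (elements : List Int) (labels : List (Int × List Int)) (k : Int) : List Int :=
  ((evsOf elements labels).filter (fun q => q.1 == k)).map (fun q => q.2)

def keysOf (elements : List Int) (labels : List (Int × List Int)) : List Int :=
  PySem.Set.ofList ((evsOf elements labels).map (fun q => q.1))

def commonOf (labels : List (Int × List Int)) (p : Int × Int) : List Int :=
  PySem.Set.inter (PySem.Set.ofList (labOf labels p.1)) (labOf labels p.2)

theorem index_getD (elements : List Int) (labels : List (Int × List Int)) (k : Int) :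
    ((evsOf elements labels).foldl (fun d q => d.modify q.1 [] (fun s => s ++ [q.2]))
        (PySem.Dict.mk ([] : List (Int × List Int)))).getD k []
      = grpOf elements labels k := by
  rw [PySem.Dict.getD_foldl_modify_append]
  rfl

theorem index_values (elements : List Int) (labels : List (Int × List Int)) :
    ((evsOf elements labels).foldl (fun d q => d.modify q.1 [] (fun s => s ++ [q.2]))
        (PySem.Dict.mk ([] : List (Int × List Int)))).values
      = (keysOf elements labels).map (grpOf elements labels) := by
  have hnd : ((evsOf elements labels).foldl (fun d q => d.modify q.1 [] (fun s => s ++ [q.2]))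
      (PySem.Dict.mk ([] : List (Int × List Int)))).keys.Nodup := by
    exact PySem.Dict.nodup_keys_foldl_modify_key (evsOf elements labels) (fun q => q.1) []
      (fun _ q => fun s => s ++ [q.2]) _ (by simp [PySem.Dict.keys])
  rw [PySem.Dict.values_eq_map_keys _ hnd []]
  have hk : ((evsOf elements labels).foldl (fun d q => d.modify q.1 [] (fun s => s ++ [q.2]))
      (PySem.Dict.mk ([] : List (Int × List Int)))).keys = keysOf elements labels := by
    rw [PySem.Dict.keys_foldl_modify_key (evsOf elements labels) (fun q => q.1) []
      (fun _ q => fun s => s ++ [q.2])]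
    simp [PySem.Dict.keys, PySem.Set.update_nil_left, keysOf]
  rw [hk]
  exact List.map_congr_left (fun k _ => index_getD elements labels k)

theorem grp_char (elements : List Int) (labels : List (Int × List Int)) (k : Int) :
    grpOf elements labels k
      = ((PySem.List.enumerate elements 0).filter
            (fun p => (PySem.Set.ofList (labOf labels p.2)).contains k)).map (fun p => p.1) := by
  unfold grpOf evsOf
  rw [List.filter_flatMap, List.map_flatMap]
  rw [← flatMap_ite_singleton (fun p => (PySem.Set.ofList (labOf labels p.2)).contains k)
        (fun p => p.1) (PySem.List.enumerate elements 0)]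
  refine List.flatMap_congr ?_
  intro p _
  rw [List.filter_map]
  have : ((fun q : Int × Int => q.1 == k) ∘ fun lab => (lab, p.1)) = fun lab => lab == k := rfl
  rw [this, List.filter_beq]
  by_cases h : k ∈ PySem.Set.ofList (labOf labels p.2)
  · have hc : (PySem.Set.ofList (labOf labels p.2)).contains k = true := by
      simpa [List.contains_iff_mem] using h
    have h1 : (PySem.Set.ofList (labOf labels p.2)).count k = 1 :=
      List.count_eq_one_of_mem (PySem.Set.nodup_ofList _) h
    simp [h1, hc]
    exact (PySem.Set.mem_ofList _ _).1 h
  · have hc : (PySem.Set.ofList (labOf labels p.2)).contains k = false := by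
      simp [List.contains_iff_mem, h]
    have h0 : (PySem.Set.ofList (labOf labels p.2)).count k = 0 :=
      List.count_eq_zero.2 h
    simp [h0, hc]
    exact fun hm => h ((PySem.Set.mem_ofList _ _).2 hm)

theorem grp_sorted (elements : List Int) (labels : List (Int × List Int)) (k : Int) :
    (grpOf elements labels k).Pairwise (· < ·) := by
  rw [grp_char]
  rw [List.pairwise_map]
  exact List.Pairwise.sublist List.filter_sublist (PySem.List.pairwise_lt_enumerate elements 0)

theorem mem_grp (elements : List Int) (labels : List (Int × List Int)) (k i : Int) (e : Int)
    (hm : (i, e) ∈ PySem.List.enumerate elements 0) :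
    (i ∈ grpOf elements labels k) ↔ k ∈ labOf labels e := by
  rw [grp_char]
  simp only [List.mem_map, List.mem_filter]
  constructor
  · rintro ⟨p, ⟨hpe, hpc⟩, hp1⟩
    obtain ⟨m, hmlt, hpeq⟩ := (PySem.List.mem_enumerate_iff _ _ _).1 hpe
    obtain ⟨m', hmlt', hpeq'⟩ := (PySem.List.mem_enumerate_iff _ _ _).1 hm
    have hi := congrArg Prod.fst hpeq'
    have he := congrArg Prod.snd hpeq'
    have hq1 := congrArg Prod.fst hpeq
    have hq2 := congrArg Prod.snd hpeq
    simp only [] at hi he hq1 hq2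
    have hmm : m = m' := by omega
    subst hmm
    have hpe2 : p.2 = e := by rw [hq2, he]
    rw [hpe2] at hpc
    have := (List.contains_iff_mem).1 hpc
    exact (PySem.Set.mem_ofList _ _).1 this
  · intro hk
    refine ⟨(i, e), ⟨hm, ?_⟩, rfl⟩
    exact List.contains_iff_mem.2 ((PySem.Set.mem_ofList _ _).2 hk)

theorem count_pairs_sorted (s : List Int) (hs : s.Pairwise (· < ·)) (i j : Int) (hij : i < j) :
    ((PySem.List.combinations s 2).map pvF).count (i, j)
      = (if i ∈ s ∧ j ∈ s then 1 else 0) := by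
  induction s with
  | nil => simp [PySem.List.combinations_nil_succ]
  | cons x s ih =>
    obtain ⟨hlt, hs'⟩ := List.pairwise_cons.1 hs
    have hnd : s.Nodup := (hs'.imp (fun h => ne_of_lt h))
    rw [pairsF_cons, List.count_append, ih hs']
    have hmap : (s.map (fun y => (x, y))).count (i, j)
        = (if x = i then (if j ∈ s then 1 else 0) else 0) := by
      by_cases hxi : x = i
      · subst hxi
        rw [if_pos rfl]
        by_cases hj : j ∈ s
        · rw [if_pos hj]
          refine List.count_eq_one_of_mem ?_ ?_
          · exact List.Nodup.map (fun a b hab => by simpa using congrArg Prod.snd hab) hnd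
          · exact List.mem_map.2 ⟨j, hj, rfl⟩
        · rw [if_neg hj, List.count_eq_zero]
          intro hmem
          obtain ⟨y, hy, hyeq⟩ := List.mem_map.1 hmem
          have : y = j := by simpa using congrArg Prod.snd hyeq
          exact hj (this ▸ hy)
      · rw [if_neg hxi, List.count_eq_zero]
        intro hmem
        obtain ⟨y, hy, hyeq⟩ := List.mem_map.1 hmem
        exact hxi (by simpa using congrArg Prod.fst hyeq)
    rw [hmap]
    by_cases hxi : x = i
    · subst hxi
      have hxs : x ∉ s := fun h => lt_irrefl x (hlt x h)
      by_cases hj : j ∈ s <;> simp [hxs, hj, List.mem_cons] <;> omega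
    · by_cases his : i ∈ s
      · have hjx : j ≠ x := by
          intro h; subst h; exact absurd (hlt i his) (by omega)
        simp [List.mem_cons, hxi, his, Ne.symm hxi, hjx]
      · simp [List.mem_cons, hxi, his, Ne.symm hxi]

theorem count_eq_common (elements : List Int) (labels : List (Int × List Int))
    (i j e1 e2 : Int)
    (h1 : (i, e1) ∈ PySem.List.enumerate elements 0)
    (h2 : (j, e2) ∈ PySem.List.enumerate elements 0) (hij : i < j) :
    (((keysOf elements labels).map (grpOf elements labels)).flatMap
        (fun idxs => (PySem.List.combinations idxs 2).map pvF)).count (i, j)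
      = (commonOf labels (e1, e2)).length := by
  rw [List.count, List.flatMap, List.countP_flatten, List.map_map, List.map_map]
  have hmapeq : ((keysOf elements labels).map
        (((List.countP fun x => x == (i, j)) ∘ fun idxs => List.map pvF (PySem.List.combinations idxs 2)) ∘ grpOf elements labels))
      = (keysOf elements labels).map
        (fun k => if (k ∈ labOf labels e1 ∧ k ∈ labOf labels e2 : Prop) then 1 else 0) := by
    refine List.map_congr_left ?_
    intro k _
    have hcp := count_pairs_sorted (grpOf elements labels k) (grp_sorted elements labels k) i j hij
    rw [List.count] at hcp
    simp only [Function.comp_apply]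
    rw [hcp]
    simp only [mem_grp elements labels k i e1 h1, mem_grp elements labels k j e2 h2]
  rw [hmapeq]
  have hdec : (keysOf elements labels).map
        (fun k => if (k ∈ labOf labels e1 ∧ k ∈ labOf labels e2 : Prop) then 1 else 0)
      = (keysOf elements labels).map
        (fun k => if ((labOf labels e1).contains k && (labOf labels e2).contains k) then 1 else 0) := by
    refine List.map_congr_left ?_
    intro k _
    by_cases h1' : k ∈ labOf labels e1 <;> by_cases h2' : k ∈ labOf labels e2 <;>
      simp [h1', h2', List.contains_iff_mem]
  rw [hdec, sum_map_ite_one_zero_nat]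
  -- RHS: intersection length as countP over the deduped first label list
  have hrhs : (commonOf labels (e1, e2)).length
      = (PySem.Set.ofList (labOf labels e1)).countP (fun x => (labOf labels e2).contains x) := by
    rw [commonOf, PySem.Set.inter, List.countP_eq_length_filter]
    rfl
  rw [hrhs]
  -- replace RHS predicate by the two-sided one on members
  have hrhs2 : (PySem.Set.ofList (labOf labels e1)).countP (fun x => (labOf labels e2).contains x)
      = (PySem.Set.ofList (labOf labels e1)).countP
          (fun k => (labOf labels e1).contains k && (labOf labels e2).contains k) := by
    refine List.countP_congr ?_
    intro k hk
    have : (labOf labels e1).contains k = true :=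
      List.contains_iff_mem.2 ((PySem.Set.mem_ofList _ _).1 hk)
    simp only [this, Bool.true_and]
  rw [hrhs2]
  -- both sides are lengths of filters of nodup lists with equal membership
  rw [List.countP_eq_length_filter, List.countP_eq_length_filter]
  refine List.Perm.length_eq ?_
  refine (List.perm_ext_iff_of_nodup ?_ ?_).2 ?_
  · exact List.Nodup.filter _ (PySem.Set.nodup_ofList _)
  · exact List.Nodup.filter _ (PySem.Set.nodup_ofList _)
  · intro k
    simp only [List.mem_filter, Bool.and_eq_true, List.contains_iff_mem]
    constructor
    · rintro ⟨-, hk1, hk2⟩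
      exact ⟨(PySem.Set.mem_ofList _ _).2 hk1, hk1, hk2⟩
    · rintro ⟨-, hk1, hk2⟩
      refine ⟨?_, hk1, hk2⟩
      -- k occurs in evs via the entry (i, e1)
      refine (PySem.Set.mem_ofList _ _).2 ?_
      refine List.mem_map.2 ⟨(k, i), ?_, rfl⟩
      unfold evsOf
      refine List.mem_flatMap.2 ⟨(i, e1), h1, ?_⟩
      exact List.mem_map.2 ⟨k, (PySem.Set.mem_ofList _ _).2 hk1, rfl⟩

def cntOf (elements : List Int) (labels : List (Int × List Int)) (v : Int × Int) : Int :=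
  ((((keysOf elements labels).map (grpOf elements labels)).flatMap
      (fun idxs => (PySem.List.combinations idxs 2).map pvF)).count v : Int)

theorem mem_epairs (elements : List Int) (c : List (Int × Int))
    (hc : c ∈ PySem.List.combinations (PySem.List.enumerate elements 0) 2) :
    ∃ i e1 j e2, c = [(i, e1), (j, e2)] ∧ (i, e1) ∈ PySem.List.enumerate elements 0 ∧
      (j, e2) ∈ PySem.List.enumerate elements 0 ∧ i < j := by
  obtain ⟨hsub, hlen⟩ := (PySem.List.mem_combinations_iff _ _ _).1 hc
  match c, hlen with
  | [a, b], _ =>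
    have hpw : List.Pairwise (fun p q : Int × Int => p.1 < q.1) [a, b] :=
      List.Pairwise.sublist hsub (PySem.List.pairwise_lt_enumerate elements 0)
    have hab : a.1 < b.1 := (List.pairwise_cons.1 hpw).1 b (by simp)
    have hma : a ∈ PySem.List.enumerate elements 0 := hsub.subset (by simp)
    have hmb : b ∈ PySem.List.enumerate elements 0 := hsub.subset (by simp)
    exact ⟨a.1, a.2, b.1, b.2, by simp, hma, hmb, hab⟩

theorem int_len_beq_zero (l : List Int) : (((l.length : Int)) == 0) = l.isEmpty := by
  cases l <;> simp <;> omega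

theorem A_closed (elements : List Int) (labels : List (Int × List Int)) (t : Int) :
    extract_pairs elements labels t =
      ( ((PySem.List.combinations elements 2).map pvF).filter
          (fun p => decide (((commonOf labels p).length : Int) > t)),
        ((PySem.List.combinations elements 2).map pvF).filter
          (fun p => (commonOf labels p).isEmpty) ) := by
  simp only [extract_pairs]
  refine Eq.trans (PySem.List.foldl_prod_mk
    (f := fun (a : List (Int × Int)) (p : Int × Int) =>
      if (((PySem.Set.ofList ((PySem.Dict.mk labels).getD p.1 [])).inter
            ((PySem.Dict.mk labels).getD p.2 [])).length : Int) > t then a ++ [p] else a)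
    (g := fun (a : List (Int × Int)) (p : Int × Int) =>
      if ((PySem.Set.ofList ((PySem.Dict.mk labels).getD p.1 [])).inter
            ((PySem.Dict.mk labels).getD p.2 [])).isEmpty then a ++ [p] else a)
    _ [] []) ?_
  refine Prod.ext ?_ ?_
  · refine Eq.trans (PySem.List.foldl_append_ite_eq_filter _ _ _) ?_
    rw [List.nil_append]; rfl
  · refine Eq.trans (PySem.List.foldl_append_if_eq_filter _ _ _) ?_
    rw [List.nil_append]; rfl

theorem B_closed (elements : List Int) (labels : List (Int × List Int)) (t : Int) :
    extract_pairs_alt elements labels t =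
      ( (((PySem.List.combinations (PySem.List.enumerate elements 0) 2).map pvG).filter
            (fun pq => decide (cntOf elements labels (pq.1.1, pq.2.1) > t))).map pvProj,
        (((PySem.List.combinations (PySem.List.enumerate elements 0) 2).map pvG).filter
            (fun pq => cntOf elements labels (pq.1.1, pq.2.1) == 0)).map pvProj ) := by
  have hcnt : ∀ v : Int × Int,
      (((((PySem.List.enumerate elements 0).flatMap
              (fun p => (PySem.Set.ofList ((PySem.Dict.mk labels).getD p.2 [])).map (fun lab => (lab, p.1)))).foldl
            (fun d q => d.modify q.1 [] (fun s => s ++ [q.2])) (PySem.Dict.mk [])).values.flatMap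
          (fun idxs => (PySem.List.combinations idxs 2).map (fun c => (c.getD 0 0, c.getD 1 0)))).foldl
          (fun d k => d.modify k 0 (fun x => x + 1)) (PySem.Dict.mk [])).getD v 0
        = cntOf elements labels v := by
    intro v
    rw [PySem.Dict.getD_foldl_modify_add_one]
    show (PySem.Dict.mk ([] : List ((Int × Int) × Int))).getD v 0 +
        ((((evsOf elements labels).foldl (fun d q => d.modify q.1 [] (fun s => s ++ [q.2]))
              (PySem.Dict.mk [])).values.flatMap
            (fun idxs => (PySem.List.combinations idxs 2).map (fun c => (c.getD 0 0, c.getD 1 0)))).count v : Int)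
      = cntOf elements labels v
    rw [index_values]
    show (0 : Int) + _ = _
    rw [Int.zero_add]
    rfl
  simp only [extract_pairs_alt, hcnt]
  refine Eq.trans (PySem.List.foldl_prod_mk
    (f := fun (a : List (Int × Int)) (pq : (Int × Int) × (Int × Int)) =>
      if cntOf elements labels (pq.1.1, pq.2.1) > t then a ++ [(pq.1.2, pq.2.2)] else a)
    (g := fun (a : List (Int × Int)) (pq : (Int × Int) × (Int × Int)) =>
      if cntOf elements labels (pq.1.1, pq.2.1) == 0 then a ++ [(pq.1.2, pq.2.2)] else a)
    _ [] []) ?_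
  refine Prod.ext ?_ ?_
  · refine Eq.trans (PySem.List.foldl_append_ite _ _ _ _) ?_
    rw [List.nil_append]; rfl
  · refine Eq.trans (PySem.List.foldl_append_if _ _ _ _) ?_
    rw [List.nil_append]; rfl

theorem AB_equal (elements : List Int) (labels : List (Int × List Int)) (t : Int) :
    extract_pairs elements labels t = extract_pairs_alt elements labels t := by
  rw [A_closed, B_closed, pairsA_eq]
  refine Prod.ext ?_ ?_ <;>
  · dsimp only
    rw [List.filter_map]
    refine congrArg (List.map pvProj) ?_
    refine List.filter_congr ?_
    intro pq hpq
    obtain ⟨c, hc, hceq⟩ := List.mem_map.1 hpq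
    obtain ⟨i, e1, j, e2, hcform, h1, h2, hij⟩ := mem_epairs elements c hc
    subst hcform
    have hpqe : pq = ((i, e1), (j, e2)) := by rw [← hceq]; rfl
    subst hpqe
    have hcc := count_eq_common elements labels i j e1 e2 h1 h2 hij
    simp only [Function.comp_apply, pvProj, cntOf, hcc]
    first
      | rfl
      | (rw [int_len_beq_zero])

-- ===== VERDICT (by name: the statement is the Claim_ definition above) =====
theorem extract_pairs_spec : Claim_equal_extract_pairs := by
  intro elements labels t _ _
  show extract_pairs elements labels t = extract_pairs_alt elements labels t
  exact AB_equal elements labels t
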